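-- pv_equiv track=rewrite | github.com/lbybee/DiSTL | DiSTL/build.py | _ngrams_tokenizer
-- ===== SOURCE A (Python) =====
-- def _ngrams_tokenizer(doc, vocab_dict, n_grams):
--     """converts list of terms into dict of token counts,
--     for the n-gram case.
--
--     Parameters
--     ----------
--     doc : list
--         list of terms
--     vocab_dict : dict-like
--         map from unique term to clean unique term
--     n_grams : scalar
--         token word count, e.g. n_grams == 1: unigrams
--         n_grams == 2: bigrams
--
--     Returns
--     -------
--     dictionary of token counts
--     """
--
--     n_doc = {}
--
--     for d_ind in range(len(doc) + 1 - n_grams):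
--
--         # generate cleaned terms conditional on vocab_dict
--         t_doc = doc[d_ind:d_ind+n_grams]
--         nt_doc = []
--         for term in t_doc:
--             try:
--                 term = vocab_dict[term]
--                 nt_doc.append(term)
--             except:
--                 continue
--
--         # generate the token and add to dict
--         if len(nt_doc) == n_grams:
--             term = " ".join(nt_doc)
--             if term not in n_doc:
--                 n_doc[term] = 1
--             else:
--                 n_doc[term] += 1
--
--     return n_doc
-- ===== SOURCE B (Python) =====
-- def _ngrams_tokenizer(doc, vocab_dict, n_grams):
--     """Two-pass variant: clean the whole doc once (value + presence mask),
--     then slide windows over the cleaned lists, so each term is looked up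
--     once instead of once per window."""
--     cleaned = []
--     present = []
--     for t in doc:
--         try:
--             cleaned.append(vocab_dict[t])
--             present.append(True)
--         except:
--             cleaned.append("")
--             present.append(False)
--     n_doc = {}
--     for i in range(len(doc) + 1 - n_grams):
--         if all(present[i:i + n_grams]):
--             token = " ".join(cleaned[i:i + n_grams])
--             n_doc[token] = n_doc.get(token, 0) + 1
--     return n_doc
-- ===== Notes on version B (the rewrite author's own statement) =====
-- stated objective: alternative
-- what changed: B cleans the whole document once into a parallel value/presence list and then slides windows over the precomputed lists, instead of A re-looking-up every term of every window in vocab_dict.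
-- outside the precondition, e.g. on _ngrams_tokenizer(['a'], {}, -1): A returns {}, B returns {'': 3}
import Mathlib
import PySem

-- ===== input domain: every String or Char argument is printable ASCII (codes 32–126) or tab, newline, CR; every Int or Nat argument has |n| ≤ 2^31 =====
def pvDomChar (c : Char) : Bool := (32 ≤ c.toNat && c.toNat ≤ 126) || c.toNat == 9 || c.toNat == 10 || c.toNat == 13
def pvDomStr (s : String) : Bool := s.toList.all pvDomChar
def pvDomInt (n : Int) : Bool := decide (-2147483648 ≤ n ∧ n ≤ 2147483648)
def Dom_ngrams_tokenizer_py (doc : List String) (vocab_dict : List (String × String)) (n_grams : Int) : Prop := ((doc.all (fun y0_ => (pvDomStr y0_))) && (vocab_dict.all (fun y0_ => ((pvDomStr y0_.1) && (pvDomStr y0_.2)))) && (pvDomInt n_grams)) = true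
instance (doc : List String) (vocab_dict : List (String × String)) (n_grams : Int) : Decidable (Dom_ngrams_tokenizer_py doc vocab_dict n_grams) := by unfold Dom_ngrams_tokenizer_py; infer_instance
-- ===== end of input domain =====

-- B cleans the document once into parallel value/presence lists and then slides windows over them
-- (one vocab lookup per term instead of one per window position); same results for n_grams ≥ 0.


-- ===== PORT A =====
def ngrams_tokenizer_py (doc : List String) (vocab_dict : List (String × String)) (n_grams : Int) : List (String × Int) :=
  let vd : PySem.Dict String String := PySem.Dict.mk vocab_dict
  ((PySem.List.pyRange 0 ((doc.length : Int) + 1 - n_grams) 1).foldl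
    (fun n_doc d_ind =>
      let t_doc := PySem.List.slice doc (some d_ind) (some (d_ind + n_grams))
      let nt_doc := t_doc.foldl
        (fun acc term =>
          match vd.get? term with
          | some v => acc ++ [v]
          | none => acc) ([] : List String)
      if (nt_doc.length : Int) = n_grams then
        let term := PySem.Str.join " " nt_doc
        if n_doc.contains term = false then n_doc.insert term 1
        else n_doc.insert term (n_doc.getD term 0 + 1)
      else n_doc)
    (PySem.Dict.empty : PySem.Dict String Int)).items

-- ===== PORT B =====
def ngrams_tokenizer_py_alt (doc : List String) (vocab_dict : List (String × String)) (n_grams : Int) : List (String × Int) :=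
  let vd : PySem.Dict String String := PySem.Dict.mk vocab_dict
  -- first pass: cleaned values with a parallel presence mask
  let cleaned := doc.map (fun t => (vd.get? t).getD "")
  let present := doc.map (fun t => (vd.get? t).isSome)
  -- second pass: slide windows over the precomputed lists
  ((PySem.List.pyRange 0 ((doc.length : Int) + 1 - n_grams) 1).foldl
    (fun n_doc i =>
      if (PySem.List.slice present (some i) (some (i + n_grams))).all id then
        let token := PySem.Str.join " " (PySem.List.slice cleaned (some i) (some (i + n_grams)))
        n_doc.insert token (n_doc.getD token 0 + 1)
      else n_doc)
    (PySem.Dict.empty : PySem.Dict String Int)).items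

-- ===== PRECONDITION & SPEC =====
-- Pre_ excludes negative n_grams (a meaningless n-gram size, outside the function's natural domain),
-- where A happens to return {} because every slice is empty while B counts the empty token.
def Pre_ngrams_tokenizer_py (doc : List String) (vocab_dict : List (String × String)) (n_grams : Int) : Prop :=
  0 ≤ n_grams
instance (doc : List String) (vocab_dict : List (String × String)) (n_grams : Int) : Decidable (Pre_ngrams_tokenizer_py doc vocab_dict n_grams) := by unfold Pre_ngrams_tokenizer_py; infer_instance

def pvWitness_ngrams_tokenizer_py : List String × (List (String × String)) × Int :=
  (["a", "b", "a", "c"], [("a", "A"), ("b", "B")], 2)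

def Spec_ngrams_tokenizer_py (doc : List String) (vocab_dict : List (String × String)) (n_grams : Int) (out : List (String × Int)) : Prop := out = ngrams_tokenizer_py_alt doc vocab_dict n_grams
instance (doc : List String) (vocab_dict : List (String × String)) (n_grams : Int) (out : List (String × Int)) : Decidable (Spec_ngrams_tokenizer_py doc vocab_dict n_grams out) := by unfold Spec_ngrams_tokenizer_py; infer_instance

-- ===== CLAIM (what is proved, stated in full; the proofs are below) =====
def Claim_equal_ngrams_tokenizer_py : Prop := ∀ (doc : List String) (vocab_dict : List (String × String)) (n_grams : Int), Dom_ngrams_tokenizer_py doc vocab_dict n_grams → Pre_ngrams_tokenizer_py doc vocab_dict n_grams → Spec_ngrams_tokenizer_py doc vocab_dict n_grams (ngrams_tokenizer_py doc vocab_dict n_grams)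

-- ===== LEMMAS AND PROOFS =====

-- A's inner append-fold is a filterMap.
theorem pv_fold_filterMap (f : String → Option String) (l : List String) (acc : List String) :
    l.foldl (fun acc term => match f term with | some v => acc ++ [v] | none => acc) acc
      = acc ++ l.filterMap f := by
  induction l generalizing acc with
  | nil => simp
  | cons t l ih =>
    cases h : f t <;> simp [h, ih]

-- filterMap keeps the full length iff f is some everywhere.
theorem pv_filterMap_length (f : String → Option String) (l : List String) :
    (l.filterMap f).length = l.length ↔ ∀ t ∈ l, (f t).isSome := by
  induction l with
  | nil => simp
  | cons t l ih =>
    cases h : f t with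
    | none =>
      simp only [List.filterMap_cons, h, List.length_cons]
      constructor
      · intro hl
        exfalso
        have hle := List.length_filterMap_le f l
        omega
      · intro hall
        exact absurd (hall t (List.mem_cons_self)) (by simp [h])
    | some v =>
      simp [h, ih]

-- one window step of A equals one window step of B, given the window has full length
theorem pv_step (vd : PySem.Dict String String) (t_doc : List String) (n : Int)
    (hlen : (t_doc.length : Int) = n) (n_doc : PySem.Dict String Int) :
    (if ((t_doc.foldl
            (fun acc term => match vd.get? term with | some v => acc ++ [v] | none => acc)
            ([] : List String)).length : Int) = n then
        if n_doc.contains (PySem.Str.join " " (t_doc.foldl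
            (fun acc term => match vd.get? term with | some v => acc ++ [v] | none => acc)
            ([] : List String))) = false then
          n_doc.insert (PySem.Str.join " " (t_doc.foldl
            (fun acc term => match vd.get? term with | some v => acc ++ [v] | none => acc)
            ([] : List String))) 1
        else
          n_doc.insert (PySem.Str.join " " (t_doc.foldl
            (fun acc term => match vd.get? term with | some v => acc ++ [v] | none => acc)
            ([] : List String)))
            (n_doc.getD (PySem.Str.join " " (t_doc.foldl
              (fun acc term => match vd.get? term with | some v => acc ++ [v] | none => acc)
              ([] : List String))) 0 + 1)
      else n_doc)
    = (if (t_doc.map (fun t => (vd.get? t).isSome)).all id = true then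
        n_doc.insert (PySem.Str.join " " (t_doc.map (fun t => (vd.get? t).getD "")))
          (n_doc.getD (PySem.Str.join " " (t_doc.map (fun t => (vd.get? t).getD ""))) 0 + 1)
      else n_doc) := by
  rw [pv_fold_filterMap (fun t => vd.get? t) t_doc]
  simp only [List.nil_append]
  have hcond : ((t_doc.filterMap (fun t => vd.get? t)).length : Int) = n
      ↔ (t_doc.map (fun t => (vd.get? t).isSome)).all id = true := by
    rw [List.all_eq_true]
    constructor
    · intro h x hx
      simp only [List.mem_map] at hx
      obtain ⟨t, htl, rfl⟩ := hx
      have hl : (t_doc.filterMap (fun t => vd.get? t)).length = t_doc.length := by omega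
      simpa using (pv_filterMap_length (fun t => vd.get? t) t_doc).1 hl t htl
    · intro h
      have hall : ∀ t ∈ t_doc, ((fun t => vd.get? t) t).isSome := by
        intro t htl
        simpa using h ((vd.get? t).isSome) (List.mem_map_of_mem htl)
      have := (pv_filterMap_length (fun t => vd.get? t) t_doc).2 hall
      omega
  by_cases hc : ((t_doc.filterMap (fun t => vd.get? t)).length : Int) = n
  · rw [if_pos hc, if_pos (hcond.1 hc)]
    have hall : ∀ t ∈ t_doc, (vd.get? t).isSome := by
      have hl : (t_doc.filterMap (fun t => vd.get? t)).length = t_doc.length := by omega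
      exact (pv_filterMap_length (fun t => vd.get? t) t_doc).1 hl
    have htok : t_doc.filterMap (fun t => vd.get? t) = t_doc.map (fun t => (vd.get? t).getD "") := by
      clear hc hcond hlen
      induction t_doc with
      | nil => simp
      | cons t l ih =>
        have ht' := hall t (List.mem_cons_self)
        cases h : vd.get? t with
        | none => rw [h] at ht'; simp at ht'
        | some v =>
          simp only [List.filterMap_cons, List.map_cons, h, Option.getD_some]
          rw [ih (fun x hx => hall x (List.mem_cons_of_mem t hx))]
    rw [htok]
    by_cases hcont : n_doc.contains (PySem.Str.join " " (t_doc.map (fun t => (vd.get? t).getD ""))) = false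
    · rw [if_pos hcont]
      have h0 : n_doc.getD (PySem.Str.join " " (t_doc.map (fun t => (vd.get? t).getD ""))) 0 = 0 := by
        simp [PySem.Dict.getD_of_not_contains, hcont]
      rw [h0]
      norm_num
    · rw [if_neg hcont]
  · rw [if_neg hc, if_neg (fun h => hc (hcond.2 h))]

-- ===== VERDICT (by name: the statement is the Claim_ definition above) =====
theorem ngrams_tokenizer_py_spec : Claim_equal_ngrams_tokenizer_py := by
  intro doc vocab_dict n_grams _hdom hpre
  have hn : (0:Int) ≤ n_grams := hpre
  unfold Spec_ngrams_tokenizer_py ngrams_tokenizer_py ngrams_tokenizer_py_alt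
  simp only []
  congr 1
  apply PySem.List.foldl_congr_mem
  intro n_doc i hi
  rw [PySem.List.mem_pyRange_one] at hi
  obtain ⟨hi0, hilt⟩ := hi
  have hb : (0:Int) ≤ i + n_grams := by omega
  have hslice : ∀ (α : Type) (xs : List α),
      PySem.List.slice xs (some i) (some (i + n_grams)) = (xs.drop i.toNat).take n_grams.toNat := by
    intro α xs
    rw [PySem.List.slice_toNat _ hi0 hb]
    congr 1
    omega
  have hmap : ∀ {β : Type} (g : String → β),
      List.take n_grams.toNat (List.drop i.toNat (doc.map g))
        = ((doc.drop i.toNat).take n_grams.toNat).map g := by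
    intro β g
    rw [← List.map_drop, ← List.map_take]
  have hlen : (((doc.drop i.toNat).take n_grams.toNat).length : Int) = n_grams := by
    simp only [List.length_take, List.length_drop]
    omega
  rw [hslice, hslice, hslice, hmap, hmap]
  exact pv_step (PySem.Dict.mk vocab_dict) ((doc.drop i.toNat).take n_grams.toNat) n_grams hlen n_doc
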